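-- pv_equiv track=rewrite | github.com/aws-cloud-clubs/ACC-EWHA-study | week05/완전탐색/최소직사각형.py | solution
-- ===== SOURCE A (Python) =====
-- def solution(sizes):
--     max_width = 0
--     max_height = 0
--     for w, h in sizes:
--         w, h = max(w, h), min(w, h)
--         max_width = max(max_width, w)
--         max_height = max(max_height, h)
--
--     return max_width * max_height
-- ===== SOURCE B (Python) =====
-- def solution(sizes):
--     longs = sorted([0] + [max(w, h) for w, h in sizes])
--     shorts = sorted([0] + [min(w, h) for w, h in sizes])
--     return longs[-1] * shorts[-1]
-- ===== Notes on version B (the rewrite author's own statement) =====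
-- stated objective: alternative
-- what changed: Replaces A's single running-max loop with a sort-based approach: sort the 0-seeded list of larger sides and the 0-seeded list of smaller sides, then multiply the last (largest) element of each.
import Mathlib
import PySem

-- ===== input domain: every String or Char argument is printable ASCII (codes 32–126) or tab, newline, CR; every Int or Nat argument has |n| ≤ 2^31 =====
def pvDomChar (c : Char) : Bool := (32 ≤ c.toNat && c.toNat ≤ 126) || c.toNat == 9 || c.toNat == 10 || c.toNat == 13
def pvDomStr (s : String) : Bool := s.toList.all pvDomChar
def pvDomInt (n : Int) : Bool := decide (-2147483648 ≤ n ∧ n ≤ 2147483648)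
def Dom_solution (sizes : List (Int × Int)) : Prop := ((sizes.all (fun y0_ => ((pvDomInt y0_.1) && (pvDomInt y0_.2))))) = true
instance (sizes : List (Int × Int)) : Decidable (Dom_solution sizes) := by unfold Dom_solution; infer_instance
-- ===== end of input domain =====

-- B replaces A's single running-max loop by sorting the seeded side-lists and reading off
-- the last (largest) element of each; same values, objective: alternative (sort vs scan).

-- ===== PORT A =====
def solution (sizes : List (Int × Int)) : Int :=
  let st := sizes.foldl
    (fun (acc : Int × Int) wh =>
      let w := max wh.1 wh.2
      let h := min wh.1 wh.2
      (max acc.1 w, max acc.2 h))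
    (0, 0)
  st.1 * st.2

-- ===== PORT B =====
def solution_alt (sizes : List (Int × Int)) : Int :=
  let longs := PySem.List.sorted ((0:Int) :: sizes.map (fun p => max p.1 p.2)) (fun y => y)
  let shorts := PySem.List.sorted ((0:Int) :: sizes.map (fun p => min p.1 p.2)) (fun y => y)
  PySem.List.pyGetD longs (-1) 0 * PySem.List.pyGetD shorts (-1) 0

-- ===== PRECONDITION & SPEC =====
def Spec_solution (sizes : List (Int × Int)) (out : Int) : Prop := out = solution_alt sizes
instance (sizes : List (Int × Int)) (out : Int) : Decidable (Spec_solution sizes out) := by unfold Spec_solution; infer_instance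

-- ===== CLAIM (what is proved, stated in full; the proofs are below) =====
def Claim_equal_solution : Prop := ∀ (sizes : List (Int × Int)), Dom_solution sizes → Spec_solution sizes (solution sizes)

-- ===== LEMMAS AND PROOFS =====

-- In a ≤-sorted list every element is bounded by the last element.
theorem le_getLast_of_pairwise (l : List Int) (h : l.Pairwise (· ≤ ·)) (hne : l ≠ [])
    (x : Int) (hx : x ∈ l) : x ≤ l.getLast hne := by
  induction l with
  | nil => simp at hx
  | cons a t ih =>
    rcases List.mem_cons.mp hx with rfl | hx'
    · cases t with
      | nil => simp
      | cons b u =>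
        have hb : ∀ y ∈ b :: u, x ≤ y := (List.pairwise_cons.mp h).1
        have : x ≤ (b :: u).getLast (by simp) := hb _ (List.getLast_mem _)
        simpa [List.getLast_cons] using this
    · cases t with
      | nil => simp at hx'
      | cons b u =>
        have := ih (List.pairwise_cons.mp h).2 (by simp) hx'
        simpa [List.getLast_cons] using this

-- B's "sort then take the last element" of the 0-seeded list IS the running max from 0.
theorem last_sorted_eq_foldl_max (xs : List Int) :
    PySem.List.pyGetD (PySem.List.sorted ((0:Int) :: xs) (fun y => y)) (-1) 0
      = xs.foldl max 0 := by
  set l := PySem.List.sorted ((0:Int) :: xs) (fun y => y) with hl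
  have hperm : l.Perm ((0:Int) :: xs) := PySem.List.sorted_perm _ _ _
  have hne : l ≠ [] := by
    intro h; have := hperm.length_eq; simp [h] at this
  rw [PySem.List.pyGetD_neg_one l 0 hne]
  have hpw : l.Pairwise (· ≤ ·) := PySem.List.sorted_pairwise _ _
  have hmax := PySem.List.le_foldl_max xs 0
  have hMmem : xs.foldl max 0 ∈ (0:Int) :: xs := by
    rcases PySem.List.foldl_max_mem xs 0 with h | h
    · rw [h]; exact List.mem_cons_self
    · exact List.mem_cons_of_mem _ h
  apply le_antisymm
  · rcases List.mem_cons.mp (hperm.mem_iff.mp (List.getLast_mem hne)) with h | h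
    · rw [h]; exact hmax.1
    · exact hmax.2 _ h
  · exact le_getLast_of_pairwise l hpw hne _ (hperm.mem_iff.mpr hMmem)

-- A's paired fold computes the two running maxima component-wise.
theorem solution_fold_split (sizes : List (Int × Int)) (aw ah : Int) :
    sizes.foldl
      (fun (acc : Int × Int) wh =>
        let w := max wh.1 wh.2
        let h := min wh.1 wh.2
        (max acc.1 w, max acc.2 h))
      (aw, ah)
    = ((sizes.map (fun p => max p.1 p.2)).foldl max aw,
       (sizes.map (fun p => min p.1 p.2)).foldl max ah) := by
  induction sizes generalizing aw ah with
  | nil => rfl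
  | cons x t ih => simp [List.foldl, ih]

-- ===== VERDICT (by name: the statement is the Claim_ definition above) =====
theorem solution_spec : Claim_equal_solution := by
  intro sizes _
  unfold Spec_solution solution solution_alt
  simp [solution_fold_split, last_sorted_eq_foldl_max]
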